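-- pv_equiv track=rewrite | github.com/mapledxf/vwm_data_prepare | gen_taco_phone_seq.py | cut_pinyin_tone
-- ===== SOURCE A (Python) =====
-- sm = 'b p m f d t n l g k h j q x zh ch sh r z c s y w'.split()
--
-- def cut_pinyin_tone(tone):
--     length = len(tone)
--     i = length
--     if tone == 'xr':
--         return [tone]
--     while i > 0:
--         if tone[:i] in sm:
--             break
--         i -= 1
--     if i > 0:
--         if tone[i:] != 'va':
--             return [tone[:i], tone[i:]]
--         else:
--             return [tone[:i], tone[i:] + 'n']
--     else:
--         return [tone]
-- ===== SOURCE B (Python) =====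
-- _TWO = {'zh', 'ch', 'sh'}
-- _ONE = set('bpmfdtnlgkhjqxrzcsyw')
--
-- def cut_pinyin_tone(tone):
--     if tone == 'xr':
--         return [tone]
--     if tone[:2] in _TWO:
--         initial, rest = tone[:2], tone[2:]
--     elif tone[:1] in _ONE:
--         initial, rest = tone[:1], tone[1:]
--     else:
--         return [tone]
--     if rest == 'va':
--         rest += 'n'
--     return [initial, rest]
-- ===== Notes on version B (the rewrite author's own statement) =====
-- stated objective: simpler
-- what changed: Replaces the descending while-loop that slices ever-shorter prefixes and tests each against the full initials list with loop-free constant-time dispatch: check the 2-char prefix against the three 2-letter initials, else the 1-char prefix against the 1-letter initials.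
import Mathlib
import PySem

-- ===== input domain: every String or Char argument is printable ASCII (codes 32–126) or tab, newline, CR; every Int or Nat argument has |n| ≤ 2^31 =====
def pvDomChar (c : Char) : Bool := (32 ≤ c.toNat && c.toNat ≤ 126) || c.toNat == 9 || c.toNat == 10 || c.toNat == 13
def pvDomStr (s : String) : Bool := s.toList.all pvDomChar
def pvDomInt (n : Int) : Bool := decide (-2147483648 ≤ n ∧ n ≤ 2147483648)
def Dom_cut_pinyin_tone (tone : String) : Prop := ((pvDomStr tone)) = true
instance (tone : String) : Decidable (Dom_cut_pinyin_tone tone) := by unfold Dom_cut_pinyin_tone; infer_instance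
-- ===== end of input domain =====

-- B replaces A's descending prefix-slicing loop over the full initials list by loop-free
-- dispatch on the 2-char then 1-char prefix against split tables; objective: simpler.


-- ===== PORT A =====
-- sm = 'b p m f d t n l g k h j q x zh ch sh r z c s y w'.split()
def pvSm : List (List Char) :=
  PySem.Chars.split₀ "b p m f d t n l g k h j q x zh ch sh r z c s y w".toList

-- while i > 0: if tone[:i] in sm: break; i -= 1   (returns the final i)
def pvALoop (cs : List Char) : Nat → Nat
  | 0 => 0
  | k + 1 =>
      if pvSm.contains (PySem.Chars.slice cs none (some ((k + 1 : Nat) : Int))) then k + 1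
      else pvALoop cs k

def cut_pinyin_tone (tone : String) : List String :=
  let cs := tone.toList
  let length := cs.length
  if cs = "xr".toList then [tone]
  else
    let i := pvALoop cs length
    if i > 0 then
      if PySem.Chars.slice cs (some (i : Int)) none ≠ "va".toList then
        [String.ofList (PySem.Chars.slice cs none (some (i : Int))),
         String.ofList (PySem.Chars.slice cs (some (i : Int)) none)]
      else
        [String.ofList (PySem.Chars.slice cs none (some (i : Int))),
         String.ofList (PySem.Chars.slice cs (some (i : Int)) none ++ "n".toList)]
    else [tone]

-- ===== PORT B =====
def pvTwo : List (List Char) := ["zh".toList, "ch".toList, "sh".toList]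
def pvOne : List Char := "bpmfdtnlgkhjqxrzcsyw".toList

-- the shared tail of B: 'va' fixup, then [initial, rest]
def pvFinish (ini rest : List Char) : List String :=
  if rest = "va".toList then [String.ofList ini, String.ofList (rest ++ "n".toList)]
  else [String.ofList ini, String.ofList rest]

def cut_pinyin_tone_alt (tone : String) : List String :=
  let cs := tone.toList
  if cs = "xr".toList then [tone]
  else if pvTwo.contains (cs.take 2) then pvFinish (cs.take 2) (cs.drop 2)
  else
    match cs with
    | c :: rest => if pvOne.contains c then pvFinish [c] rest else [tone]
    | [] => [tone]

-- ===== PRECONDITION & SPEC =====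
def Spec_cut_pinyin_tone (tone : String) (out : List String) : Prop := out = cut_pinyin_tone_alt tone
instance (tone : String) (out : List String) : Decidable (Spec_cut_pinyin_tone tone out) := by unfold Spec_cut_pinyin_tone; infer_instance

-- ===== CLAIM (what is proved, stated in full; the proofs are below) =====
def Claim_equal_cut_pinyin_tone : Prop := ∀ (tone : String), Dom_cut_pinyin_tone tone → Spec_cut_pinyin_tone tone (cut_pinyin_tone tone)

-- ===== LEMMAS AND PROOFS =====

-- the concrete value of sm
theorem pvSm_eq : pvSm =
  [['b'],['p'],['m'],['f'],['d'],['t'],['n'],['l'],['g'],['k'],['h'],['j'],['q'],['x'],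
   ['z','h'],['c','h'],['s','h'],['r'],['z'],['c'],['s'],['y'],['w']] := by decide

theorem pvOne_eq : pvOne = ['b','p','m','f','d','t','n','l','g','k','h','j','q','x','r','z','c','s','y','w'] := by decide

theorem pvTwo_eq : pvTwo = [['z','h'],['c','h'],['s','h']] := by decide

-- every initial has length ≤ 2
theorem pvSm_short : ∀ s ∈ pvSm, s.length ≤ 2 := by rw [pvSm_eq]; decide

-- tone[:k] and tone[k:] for a natural k
theorem pvSlice_take (cs : List Char) (k : Nat) :
    PySem.Chars.slice cs none (some ((k : Nat) : Int)) = cs.take k := by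
  simp [PySem.Chars.slice_eq_listSlice, PySem.List.slice_to_natCast]

theorem pvSlice_drop (cs : List Char) (k : Nat) :
    PySem.Chars.slice cs (some ((k : Nat) : Int)) none = cs.drop k := by
  simp [PySem.Chars.slice_eq_listSlice, PySem.List.slice_from_natCast]

-- the loop steps down past every i ≥ 3 (prefixes of length ≥ 3 are never initials)
theorem pvALoop_ge_two (cs : List Char) (k : Nat) (h2 : 2 ≤ k) (hk : k ≤ cs.length) :
    pvALoop cs k = pvALoop cs 2 := by
  induction k with
  | zero => omega
  | succ k ih =>
    rcases Nat.lt_or_ge k 2 with hlt | hge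
    · interval_cases k
      · omega
      · rfl
    · rw [pvALoop]
      have hnot : pvSm.contains (PySem.Chars.slice cs none (some ((k + 1 : Nat) : Int))) = false := by
        by_contra h
        have hc : pvSm.contains (PySem.Chars.slice cs none (some ((k + 1 : Nat) : Int))) = true := by
          cases hc : pvSm.contains (PySem.Chars.slice cs none (some ((k + 1 : Nat) : Int)))
          · exact absurd hc h
          · rfl
        have hlen := pvSm_short _ (List.contains_iff_mem.mp hc)
        rw [pvSlice_take, List.length_take] at hlen
        omega
      rw [hnot]
      simp only [Bool.false_eq_true, if_false]
      exact ih hge (Nat.le_of_succ_le hk)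

-- the loop's final value from i = 2 downwards
theorem pvALoop_two (cs : List Char) :
    pvALoop cs 2 = if pvSm.contains (cs.take 2) then 2
      else if pvSm.contains (cs.take 1) then 1 else 0 := by
  rw [pvALoop, pvALoop]
  rw [show ((1 + 1 : Nat) : Int) = ((2 : Nat) : Int) from rfl]
  rw [pvSlice_take]
  rw [show ((0 + 1 : Nat) : Int) = ((1 : Nat) : Int) from rfl]
  rw [pvSlice_take]
  simp [pvALoop]

-- a 1-char prefix is in sm iff its char is a 1-letter initial
theorem pvOne_mem (c : Char) : pvSm.contains [c] = pvOne.contains c := by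
  rw [Bool.eq_iff_iff, List.contains_iff_mem, List.contains_iff_mem, pvSm_eq, pvOne_eq]
  simp

-- a 2-char prefix is in sm iff it is one of the 2-letter initials
theorem pvTwo_mem (c d : Char) : pvSm.contains [c, d] = pvTwo.contains [c, d] := by
  rw [Bool.eq_iff_iff, List.contains_iff_mem, List.contains_iff_mem, pvSm_eq, pvTwo_eq]
  simp

-- a 1-char list is never a 2-letter initial
theorem pvTwo_not_one (c : Char) : pvTwo.contains [c] = false := by
  rw [pvTwo_eq]; simp

-- ===== VERDICT (by name: the statement is the Claim_ definition above) =====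
theorem cut_pinyin_tone_spec : Claim_equal_cut_pinyin_tone := by
  intro tone _
  unfold Spec_cut_pinyin_tone cut_pinyin_tone cut_pinyin_tone_alt
  by_cases hxr : tone.toList = "xr".toList
  · simp [hxr]
  · simp only [hxr, if_false]
    match hcs : tone.toList with
    | [] =>
      simp [pvALoop, pvTwo_eq]
    | [c] =>
      have h1 : pvALoop [c] 1 = if pvSm.contains [c] then 1 else 0 := by
        rw [pvALoop]
        rw [show ((0 + 1 : Nat) : Int) = ((1 : Nat) : Int) from rfl, pvSlice_take]
        rfl
      simp only [List.length_cons, List.length_nil, Nat.zero_add, h1, pvOne_mem]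
      rw [show ([c].take 2) = [c] from rfl, pvTwo_not_one]
      simp only [Bool.false_eq_true, if_false]
      cases ho : pvOne.contains c
      · simp
      · simp only [gt_iff_lt, Nat.zero_lt_one, if_pos trivial, pvFinish]
        rw [show ((1 : Nat) : Int) = (1 : Int) from rfl] at *
        rw [show PySem.Chars.slice [c] (some (1 : Int)) none = ([c].drop 1) from pvSlice_drop [c] 1]
        rw [show PySem.Chars.slice [c] none (some (1 : Int)) = ([c].take 1) from pvSlice_take [c] 1]
        simp
    | c :: d :: rest =>
      have hlen : (c :: d :: rest).length = rest.length + 2 := by simp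
      have hloop : pvALoop (c :: d :: rest) (c :: d :: rest).length =
          if pvTwo.contains [c, d] then 2 else if pvOne.contains c then 1 else 0 := by
        rw [hlen, pvALoop_ge_two (c :: d :: rest) (rest.length + 2) (by omega) (by simp),
            pvALoop_two]
        rw [show ((c :: d :: rest).take 2) = [c, d] from rfl,
            show ((c :: d :: rest).take 1) = [c] from rfl, pvTwo_mem, pvOne_mem]
      simp only [hloop]
      rw [show ((c :: d :: rest).take 2) = [c, d] from rfl]
      cases h2 : pvTwo.contains [c, d]
      · simp only [Bool.false_eq_true, if_false]
        cases h1 : pvOne.contains c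
        · simp
        · simp only [gt_iff_lt, Nat.zero_lt_one, if_pos trivial, pvFinish]
          rw [show PySem.Chars.slice (c :: d :: rest) (some ((1 : Nat) : Int)) none =
                ((c :: d :: rest).drop 1) from pvSlice_drop _ 1,
              show PySem.Chars.slice (c :: d :: rest) none (some ((1 : Nat) : Int)) =
                ((c :: d :: rest).take 1) from pvSlice_take _ 1]
          by_cases hva : (d :: rest) = "va".toList
          · rw [if_neg (by simp [hva]), if_pos hva]
            simp [hva]
          · rw [if_pos (by simpa using hva), if_neg hva]
            simp
      · simp only [gt_iff_lt, Nat.zero_lt_two, if_pos trivial, pvFinish]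
        rw [show PySem.Chars.slice (c :: d :: rest) (some ((2 : Nat) : Int)) none =
              ((c :: d :: rest).drop 2) from pvSlice_drop _ 2,
            show PySem.Chars.slice (c :: d :: rest) none (some ((2 : Nat) : Int)) =
              ((c :: d :: rest).take 2) from pvSlice_take _ 2]
        by_cases hva : rest = "va".toList <;> simp [hva]
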